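-- pv_equiv track=rewrite | github.com/davidiach/erdos97 | scripts/check_n9_base_apex_escape_budget.py | capacity_deficit_distribution
-- ===== SOURCE A (Python) =====
-- from collections import Counter
-- from typing import Any, Iterable, Sequence
--
-- def binom2(value: int) -> int:
--     """Return binom(value, 2)."""
--
--     if value < 0:
--         raise ValueError(f"value must be nonnegative, got {value}")
--     return value * (value - 1) // 2
--
-- def integer_partitions(total: int, minimum: int = 1) -> Iterable[tuple[int, ...]]:
--     """Yield nondecreasing positive integer partitions of total."""
--
--     if total < 0:
--         raise ValueError(f"total must be nonnegative, got {total}")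
--     if total == 0:
--         yield ()
--         return
--     for first in range(minimum, total + 1):
--         for rest in integer_partitions(total - first, first):
--             yield (first, *rest)
--
-- def distance_profiles(n: int, witness_size: int) -> list[tuple[int, tuple[int, ...]]]:
--     """Return independently enumerated profile-excess rows."""
--
--     baseline = binom2(witness_size)
--     rows = []
--     for ascending_parts in integer_partitions(n - 1):
--         parts = tuple(reversed(ascending_parts))
--         if max(parts, default=0) < witness_size:
--             continue
--         excess = sum(binom2(part) for part in parts) - baseline
--         rows.append((excess, parts))
--     return sorted(rows, key=lambda row: (row[0], row[1]))
--
-- def base_apex_slack(n: int, witness_size: int) -> int: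
--     """Return the upper-minus-baseline base-apex slack."""
--
--     return n * (n - 2) - binom2(witness_size) * n
--
-- def excess_distributions(
--     n: int,
--     witness_size: int,
-- ) -> list[tuple[tuple[int, ...], int, int]]:
--     """Return sorted unlabeled profile-excess distributions within slack."""
--
--     slack = base_apex_slack(n, witness_size)
--     values = [
--         excess
--         for excess, _parts in distance_profiles(n, witness_size)
--         if excess <= slack
--     ]
--     out: list[tuple[tuple[int, ...], int, int]] = []
--
--     def search(start_index: int, slots_left: int, remaining: int, current: list[int]) -> None:
--         if slots_left == 0:
--             total = sum(current)
--             out.append((tuple(current), total, slack - total))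
--             return
--         for index in range(start_index, len(values)):
--             value = values[index]
--             if value > remaining:
--                 break
--             current.append(value)
--             search(index, slots_left - 1, remaining - value, current)
--             current.pop()
--
--     search(0, n, slack, [])
--     return sorted(out, key=lambda row: (row[1], row[0]))
--
-- def capacity_deficit_distribution(n: int, witness_size: int) -> list[dict[str, int]]:
--     """Return profile-ledger counts by capacity deficit."""
--
--     slack = base_apex_slack(n, witness_size)
--     counts = Counter(deficit for _excesses, _total, deficit in excess_distributions(n, witness_size))
--     return [
--         {
--             "capacity_deficit": deficit,
--             "total_profile_excess": slack - deficit,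
--             "profile_ledger_count": counts[deficit],
--         }
--         for deficit in range(slack + 1)
--     ]
-- ===== SOURCE B (Python) =====
-- def _ascending_partitions(total, minimum):
--     """All nondecreasing positive partitions of total with parts >= minimum."""
--     if total == 0:
--         return [[]]
--     return [[first] + rest
--             for first in range(minimum, total + 1)
--             for rest in _ascending_partitions(total - first, first)]
--
--
-- def capacity_deficit_distribution(n, witness_size):
--     """Return profile-ledger counts by capacity deficit (DP instead of enumeration)."""
--     w = witness_size
--     slack = n * (n - 2) - w * (w - 1) // 2 * n
--     if slack < 0:
--         return []
--     base = w * (w - 1) // 2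
--     excesses = []
--     for parts in _ascending_partitions(n - 1, 1):
--         if (parts[-1] if parts else 0) >= w:
--             e = sum(p * (p - 1) // 2 for p in parts) - base
--             if e <= slack:
--                 excesses.append(e)
--     values = sorted(excesses)
--     # dp[k][s] = number of size-k multisets over positions of `values` with sum s
--     dp = [[1] + [0] * slack] + [[0] * (slack + 1) for _ in range(n)]
--     for v in values:
--         new = [dp[0]]
--         for k in range(1, n + 1):
--             prev = new[k - 1]
--             new.append([dp[k][s] + (prev[s - v] if s >= v else 0)
--                         for s in range(slack + 1)])
--         dp = new
--     top = dp[n]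
--     return [
--         {
--             "capacity_deficit": d,
--             "total_profile_excess": slack - d,
--             "profile_ledger_count": top[slack - d],
--         }
--         for d in range(slack + 1)
--     ]
-- ===== Notes on version B (the rewrite author's own statement) =====
-- stated objective: faster
-- what changed: A enumerates every size-n multiset of excess values recursively and counts them with a Counter; B counts multisets by sum with a dynamic program over (value index, slots used, sum), never materialising the multisets.
import Mathlib
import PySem

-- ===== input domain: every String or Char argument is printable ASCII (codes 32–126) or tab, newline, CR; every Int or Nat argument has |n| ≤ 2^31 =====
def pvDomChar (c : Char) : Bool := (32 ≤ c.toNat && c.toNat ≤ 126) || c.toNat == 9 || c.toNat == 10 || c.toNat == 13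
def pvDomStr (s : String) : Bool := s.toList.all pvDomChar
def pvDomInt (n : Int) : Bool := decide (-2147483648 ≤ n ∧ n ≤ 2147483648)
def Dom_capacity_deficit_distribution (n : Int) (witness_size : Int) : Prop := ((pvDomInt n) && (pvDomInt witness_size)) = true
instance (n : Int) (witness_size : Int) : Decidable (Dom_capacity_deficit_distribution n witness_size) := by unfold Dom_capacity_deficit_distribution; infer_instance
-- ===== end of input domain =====

-- B replaces A's exponential enumeration of all size-n multisets of excess values by a
-- dynamic program counting, for each sum, the multisets of positions of the sorted value
-- list (objective: faster, asymptotic).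

-- ===== PORT A =====

-- binom(value, 2); Python raises for value < 0, which Pre_ keeps out of every call site
def binom2A (value : Int) : Int := PySem.Int.floordiv (value * (value - 1)) 2

-- integer_partitions(total, minimum) as a list; fuel only makes the recursion structural
-- (any call reached from capacity_deficit_distribution has minimum ≥ 1 and enough fuel)
def partsA (fuel : Nat) (total : Int) (minimum : Int) : List (List Int) :=
  match fuel with
  | 0 => []
  | fuel + 1 =>
    if total = 0 then [[]]
    else (PySem.List.pyRange minimum (total + 1) 1).flatMap
      (fun first => (partsA fuel (total - first) first).map (fun rest => first :: rest))

def distance_profilesA (n : Int) (witness_size : Int) : List (Int × List Int) :=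
  let baseline := binom2A witness_size
  let rows := (partsA ((n - 1).toNat + 1) (n - 1) 1).foldl
    (fun rows ascending_parts =>
      let parts := ascending_parts.reverse
      if PySem.List.maxD parts (fun x => x) 0 < witness_size then rows
      else rows ++ [((parts.map binom2A).sum - baseline, parts)])
    []
  PySem.List.sorted2 rows (fun row => row.1) (fun row => row.2)

def base_apex_slackA (n : Int) (witness_size : Int) : Int :=
  n * (n - 2) - binom2A witness_size * n

-- the recursive `search`: slots index `i` is the Python loop variable, the `++` after the
-- recursive call is the rest of the `for` loop, `[]` on value > remaining is the `break`
def searchA (values : List Int) (slack : Int) :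
    Nat → Nat → Int → List Int → List (List Int × Int × Int)
  | _, 0, _, cur => [(cur, cur.sum, slack - cur.sum)]
  | i, k + 1, rem, cur =>
    if h : i < values.length then
      let v := values[i]
      if rem < v then []
      else searchA values slack i k (rem - v) (cur ++ [v]) ++
           searchA values slack (i + 1) (k + 1) rem cur
    else []
  termination_by i k _ _ => (k, values.length - i)

def excess_distributionsA (n : Int) (witness_size : Int) : List (List Int × Int × Int) :=
  let slack := base_apex_slackA n witness_size
  let values := ((distance_profilesA n witness_size).filter
    (fun row => row.1 ≤ slack)).map (fun row => row.1)
  let out := searchA values slack 0 n.toNat slack []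
  PySem.List.sorted2 out (fun row => row.2.1) (fun row => row.1)

def capacity_deficit_distribution (n : Int) (witness_size : Int) : List (List (String × Int)) :=
  let slack := base_apex_slackA n witness_size
  let counts := PySem.Dict.counter ((excess_distributionsA n witness_size).map (fun r => r.2.2))
  (PySem.List.pyRange 0 (slack + 1) 1).map (fun deficit =>
    [("capacity_deficit", deficit),
     ("total_profile_excess", slack - deficit),
     ("profile_ledger_count", counts.getD deficit 0)])

-- ===== PORT B =====

-- _ascending_partitions(total, minimum); same fuel device as partsA
def partsB (fuel : Nat) (total : Int) (minimum : Int) : List (List Int) :=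
  match fuel with
  | 0 => []
  | fuel + 1 =>
    if total = 0 then [[]]
    else (PySem.List.pyRange minimum (total + 1) 1).flatMap
      (fun first => (partsB fuel (total - first) first).map (fun rest => first :: rest))

-- the inner `for k in range(1, n+1)` loop: builds each new row from the previous new row
-- (`prev`) and the corresponding old row
def dpRowsB (ss : Nat) (v : Int) : List Int → List (List Int) → List (List Int)
  | _, [] => []
  | prev, r :: rs =>
    let row := (List.range (ss + 1)).map
      (fun s => r.getD s 0 + (if v ≤ (s : Int) then prev.getD ((s : Int) - v).toNat 0 else 0))
    row :: dpRowsB ss v row rs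

def dpStepB (ss : Nat) (v : Int) (dp : List (List Int)) : List (List Int) :=
  match dp with
  | [] => []
  | r0 :: rest => r0 :: dpRowsB ss v r0 rest

def capacity_deficit_distribution_alt (n : Int) (witness_size : Int) : List (List (String × Int)) :=
  let w := witness_size
  let slack := n * (n - 2) - PySem.Int.floordiv (w * (w - 1)) 2 * n
  if slack < 0 then []
  else
    let base := PySem.Int.floordiv (w * (w - 1)) 2
    let excesses := (partsB ((n - 1).toNat + 1) (n - 1) 1).foldl
      (fun acc parts =>
        if w ≤ (parts.getLast?).getD 0 then
          let e := (parts.map (fun p => PySem.Int.floordiv (p * (p - 1)) 2)).sum - base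
          if e ≤ slack then acc ++ [e] else acc
        else acc)
      []
    let values := PySem.List.sorted excesses (fun x => x)
    let ss := slack.toNat
    let dp0 := ((1 : Int) :: List.replicate ss 0) ::
      List.replicate n.toNat (List.replicate (ss + 1) 0)
    let dpf := values.foldl (fun dp v => dpStepB ss v dp) dp0
    let top := dpf.getD n.toNat []
    (PySem.List.pyRange 0 (slack + 1) 1).map (fun d =>
      [("capacity_deficit", d),
       ("total_profile_excess", slack - d),
       ("profile_ledger_count", top.getD (slack - d).toNat 0)])

-- ===== PRECONDITION & SPEC =====
-- Pre_ excludes exactly the inputs where A raises ValueError: n ≤ 0 (integer_partitions(n-1))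
-- or witness_size < 0 (binom2)
def Pre_capacity_deficit_distribution (n : Int) (witness_size : Int) : Prop :=
  1 ≤ n ∧ 0 ≤ witness_size
instance (n : Int) (witness_size : Int) : Decidable (Pre_capacity_deficit_distribution n witness_size) := by unfold Pre_capacity_deficit_distribution; infer_instance

def pvWitness_capacity_deficit_distribution : Int × Int := (4, 2)

def Spec_capacity_deficit_distribution (n : Int) (witness_size : Int) (out : List (List (String × Int))) : Prop := out = capacity_deficit_distribution_alt n witness_size
instance (n : Int) (witness_size : Int) (out : List (List (String × Int))) : Decidable (Spec_capacity_deficit_distribution n witness_size out) := by unfold Spec_capacity_deficit_distribution; infer_instance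

-- ===== CLAIM (what is proved, stated in full; the proofs are below) =====
def Claim_equal_capacity_deficit_distribution : Prop := ∀ (n : Int) (witness_size : Int), Dom_capacity_deficit_distribution n witness_size → Pre_capacity_deficit_distribution n witness_size → Spec_capacity_deficit_distribution n witness_size (capacity_deficit_distribution n witness_size)

-- ===== LEMMAS AND PROOFS =====


-- Cfun vs k t: the number of size-k multisets of positions of vs whose values sum to t
def Cfun : List Int → Nat → Int → Int
  | _, 0, t => if t = 0 then 1 else 0
  | [], _ + 1, _ => 0
  | v :: ws, k + 1, t => Cfun (v :: ws) k (t - v) + Cfun ws (k + 1) t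
  termination_by vs k _ => (k, vs.length)

theorem Cfun_zero (ws : List Int) (t : Int) :
    Cfun ws 0 t = if t = 0 then 1 else 0 := by
  match ws with
  | [] => simp [Cfun]
  | v :: ws => simp [Cfun]

theorem Cfun_nil_succ (k : Nat) (t : Int) : Cfun [] (k + 1) t = 0 := by simp [Cfun]

theorem Cfun_cons_succ (v : Int) (ws : List Int) (k : Nat) (t : Int) :
    Cfun (v :: ws) (k + 1) t = Cfun (v :: ws) k (t - v) + Cfun ws (k + 1) t := by
  rw [Cfun]

theorem Cfun_nonneg_arg_neg : ∀ (ws : List Int) (k : Nat) (t : Int),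
    (∀ x ∈ ws, 0 ≤ x) → t < 0 → Cfun ws k t = 0 := by
  intro ws k t
  induction ws, k, t using Cfun.induct with
  | case1 x => intro _ ht; omega
  | case2 x t ht0 => intro _ _; simp [Cfun_zero, ht0]
  | case3 n x => intro _ _; exact Cfun_nil_succ n x
  | case4 v ws k t ih1 ih2 =>
    intro hnn ht
    have h0 : 0 ≤ v := hnn v (by simp)
    rw [Cfun_cons_succ, ih1 hnn (by omega),
      ih2 (fun x hx => hnn x (by simp [hx])) ht]
    norm_num

theorem Cfun_all_gt : ∀ (ws : List Int) (k : Nat) (t : Int),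
    (∀ x ∈ ws, 0 ≤ x) → (∀ x ∈ ws, t < x) → 1 ≤ k → Cfun ws k t = 0 := by
  intro ws k t
  induction ws, k, t using Cfun.induct with
  | case1 x => intro _ _ hk; omega
  | case2 x t _ => intro _ _ hk; omega
  | case3 n x => intro _ _ _; exact Cfun_nil_succ n x
  | case4 v ws k t ih1 ih2 =>
    intro hnn hgt _
    have hv : t < v := hgt v (by simp)
    have h1 : Cfun (v :: ws) k (t - v) = 0 := by
      match k with
      | 0 => simp [Cfun_zero, show ¬(t - v = 0) by omega]
      | k + 1 => exact Cfun_nonneg_arg_neg _ _ _ hnn (by omega)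
    have h2 : Cfun ws (k + 1) t = 0 :=
      match ws with
      | [] => Cfun_nil_succ _ _
      | w :: ws' => ih2 (fun x hx => hnn x (by simp [hx]))
          (fun x hx => hgt x (by simp [hx])) (by omega)
    rw [Cfun_cons_succ, h1, h2]
    norm_num

theorem Cfun_append (v : Int) : ∀ (k : Nat) (xs : List Int) (s : Int),
    Cfun (xs ++ [v]) (k + 1) s = Cfun xs (k + 1) s + Cfun (xs ++ [v]) k (s - v) := by
  intro k
  induction k with
  | zero =>
    intro xs
    induction xs with
    | nil => intro s; simp [Cfun_cons_succ, Cfun_zero, Cfun_nil_succ]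
    | cons x xs' ih =>
      intro s
      simp only [Nat.zero_add] at ih ⊢
      rw [List.cons_append, Cfun_cons_succ, ih s, Cfun_cons_succ x xs' 0 s]
      simp only [Cfun_zero]
      ring
  | succ k' ihk =>
    intro xs
    induction xs with
    | nil => intro s; simp [Cfun_cons_succ, Cfun_nil_succ]
    | cons x xs' ih =>
      intro s
      have e1 := ihk (x :: xs') (s - x)
      have e2 : Cfun ((x :: xs') ++ [v]) (k' + 1) (s - v)
          = Cfun ((x :: xs') ++ [v]) k' (s - v - x) + Cfun (xs' ++ [v]) (k' + 1) (s - v) := by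
        simpa using Cfun_cons_succ x (xs' ++ [v]) k' (s - v)
      calc Cfun ((x :: xs') ++ [v]) (k' + 1 + 1) s
          = Cfun ((x :: xs') ++ [v]) (k' + 1) (s - x) + Cfun (xs' ++ [v]) (k' + 1 + 1) s := by
            simpa using Cfun_cons_succ x (xs' ++ [v]) (k' + 1) s
        _ = Cfun ((x :: xs') ++ [v]) (k' + 1) (s - x)
            + (Cfun xs' (k' + 1 + 1) s + Cfun (xs' ++ [v]) (k' + 1) (s - v)) := by rw [ih s]
        _ = (Cfun (x :: xs') (k' + 1) (s - x) + Cfun ((x :: xs') ++ [v]) k' (s - x - v))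
            + (Cfun xs' (k' + 1 + 1) s + Cfun (xs' ++ [v]) (k' + 1) (s - v)) := by rw [e1]
        _ = (Cfun (x :: xs') (k' + 1) (s - x) + Cfun xs' (k' + 1 + 1) s)
            + (Cfun ((x :: xs') ++ [v]) k' (s - v - x) + Cfun (xs' ++ [v]) (k' + 1) (s - v)) := by
            rw [show s - x - v = s - v - x by ring]; ring
        _ = Cfun (x :: xs') (k' + 1 + 1) s + Cfun ((x :: xs') ++ [v]) (k' + 1) (s - v) := by
            rw [Cfun_cons_succ x xs' (k' + 1) s, e2]

theorem searchA_zero (values : List Int) (slack : Int) (i : Nat) (rem : Int) (cur : List Int) :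
    searchA values slack i 0 rem cur = [(cur, cur.sum, slack - cur.sum)] := by rw [searchA]

theorem searchA_succ (values : List Int) (slack : Int) (i k : Nat) (rem : Int) (cur : List Int) :
    searchA values slack i (k + 1) rem cur =
      if h : i < values.length then
        (if rem < values[i] then []
         else searchA values slack i k (rem - values[i]) (cur ++ [values[i]]) ++
              searchA values slack (i + 1) (k + 1) rem cur)
      else [] := by rw [searchA]

theorem searchA_deficit (values : List Int) (slack : Int) :
    ∀ i k rem cur, ∀ r ∈ searchA values slack i k rem cur, r.2.2 = slack - r.2.1 := by
  intro i k rem cur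
  induction i, k, rem, cur using searchA.induct values with
  | case1 i rem cur => intro r hr; rw [searchA_zero] at hr; simp at hr; subst hr; simp
  | case2 i k rem cur h v hlt =>
    intro r hr
    rw [searchA_succ] at hr
    simp only [dif_pos h, if_pos (show rem < values[i] from hlt)] at hr
    simp at hr
  | case3 i k rem cur h v hnlt ih1 ih2 =>
    intro r hr
    rw [searchA_succ] at hr
    simp only [dif_pos h, if_neg (show ¬rem < values[i] from hnlt), List.mem_append] at hr
    cases hr with
    | inl hr => exact ih1 r hr
    | inr hr => exact ih2 r hr
  | case4 i k rem cur h => intro r hr; rw [searchA_succ] at hr; simp [h] at hr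

theorem searchA_count (values : List Int) (slack : Int)
    (hsort : values.Pairwise (· ≤ ·)) (hnn : ∀ x ∈ values, 0 ≤ x) :
    ∀ i k rem cur, ∀ t, t ≤ rem →
      (((searchA values slack i k rem cur).countP (fun r => r.2.1 == cur.sum + t) : Nat) : Int)
        = Cfun (values.drop i) k t := by
  intro i k rem cur
  induction i, k, rem, cur using searchA.induct values with
  | case1 i rem cur =>
    intro t ht
    rw [searchA_zero]
    have hb : (cur.sum == cur.sum + t) = decide (t = 0) := by
      by_cases ht0 : t = 0 <;> simp [ht0]
    by_cases ht0 : t = 0 <;>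
      simp [List.countP, List.countP.go, hb, Cfun_zero, ht0]
  | case2 i k rem cur h v hlt =>
    intro t ht
    have hdrop : values.drop i = values[i] :: values.drop (i + 1) :=
      List.drop_eq_getElem_cons h
    have hsub : (values.drop i).Sublist values := List.drop_sublist i values
    have hpw : (values.drop i).Pairwise (· ≤ ·) := hsort.sublist hsub
    have hnn' : ∀ x ∈ values.drop i, 0 ≤ x := fun x hx => hnn x (hsub.mem hx)
    have hgt : ∀ x ∈ values.drop i, t < x := by
      intro x hx
      rw [hdrop] at hx hpw
      rcases List.mem_cons.mp hx with rfl | hx'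
      · omega
      · have := (List.pairwise_cons.mp hpw).1 x hx'
        omega
    rw [searchA_succ]
    simp only [dif_pos h, if_pos (show rem < values[i] from hlt)]
    rw [Cfun_all_gt _ _ _ hnn' hgt (by omega)]
    simp
  | case3 i k rem cur h v hnlt ih1 ih2 =>
    intro t ht
    have hdrop : values.drop i = values[i] :: values.drop (i + 1) :=
      List.drop_eq_getElem_cons h
    have hsum : (cur ++ [values[i]]).sum + (t - values[i]) = cur.sum + t := by
      rw [List.sum_append, List.sum_cons, List.sum_nil]; ring
    have e1 := ih1 (t - values[i]) (by omega)
    rw [hsum] at e1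
    have e2 := ih2 t ht
    rw [searchA_succ]
    simp only [dif_pos h, if_neg (show ¬rem < values[i] from hnlt), List.countP_append]
    push_cast
    rw [e1, e2, hdrop, Cfun_cons_succ]
  | case4 i k rem cur h =>
    intro t ht
    have : values.drop i = [] := List.drop_eq_nil_of_le (by omega)
    rw [searchA_succ]
    simp [h, this, Cfun_nil_succ]


theorem partsB_eq_partsA : ∀ (fuel : Nat) (total minimum : Int),
    partsB fuel total minimum = partsA fuel total minimum := by
  intro fuel
  induction fuel with
  | zero => intro _ _; rfl
  | succ f ih => intro t m; rw [partsA, partsB]; simp only [ih]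

theorem partsA_props : ∀ (fuel : Nat) (total minimum : Int), 1 ≤ minimum →
    ∀ p ∈ partsA fuel total minimum, (∀ x ∈ p, minimum ≤ x) ∧ p.Pairwise (· ≤ ·) := by
  intro fuel
  induction fuel with
  | zero => intro _ _ _ p hp; simp [partsA] at hp
  | succ f ih =>
    intro total minimum hmin p hp
    rw [partsA] at hp
    by_cases h0 : total = 0
    · simp [h0] at hp
      subst hp; exact ⟨by simp, by simp⟩
    · simp only [if_neg h0, List.mem_flatMap, List.mem_map] at hp
      obtain ⟨first, hfirst, rest, hrest, rfl⟩ := hp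
      have hf : minimum ≤ first ∧ first < total + 1 :=
        (PySem.List.mem_pyRange_one).mp hfirst
      obtain ⟨hall, hpw⟩ := ih (total - first) first (by omega) rest hrest
      constructor
      · intro x hx
        rcases List.mem_cons.mp hx with rfl | hx'
        · omega
        · have := hall x hx'; omega
      · exact List.pairwise_cons.mpr ⟨fun y hy => hall y hy, hpw⟩

theorem binom2A_eq (v : Int) : binom2A v = v * (v - 1) / 2 := by
  unfold binom2A; rw [PySem.Int.floordiv_eq_ediv_of_pos (by norm_num)]

theorem binom2A_nonneg (v : Int) (h : 0 ≤ v) : 0 ≤ binom2A v := by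
  rw [binom2A_eq]
  apply Int.ediv_nonneg _ (by norm_num)
  rcases Int.lt_or_le v 1 with h1 | h1
  · have : v = 0 := by omega
    simp [this]
  · nlinarith

theorem binom2A_mono {a b : Int} (ha : 0 ≤ a) (hab : a ≤ b) : binom2A a ≤ binom2A b := by
  rw [binom2A_eq, binom2A_eq]
  apply Int.ediv_le_ediv (by norm_num)
  rcases Int.lt_or_le a 1 with h1 | h1
  · have : a = 0 := by omega
    subst this
    simp only [zero_mul]
    rcases Int.lt_or_le b 1 with h2 | h2
    · have : b = 0 := by omega
      simp [this]
    · nlinarith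
  · nlinarith [mul_nonneg (sub_nonneg.mpr hab) (show (0:Int) ≤ a + b - 1 by omega)]

theorem le_getLast_of_pairwise : ∀ (p : List Int) (h : p ≠ []),
    p.Pairwise (· ≤ ·) → ∀ x ∈ p, x ≤ p.getLast h := by
  intro p
  induction p with
  | nil => simp
  | cons a p ih =>
    intro _ hpw x hx
    match p with
    | [] =>
      simp at hx
      simp [hx]
    | b :: p' =>
      rw [List.getLast_cons (by simp)]
      have hbl : b ≤ (b :: p').getLast (by simp) :=
        ih (by simp) (List.pairwise_cons.mp hpw).2 b (by simp)
      rcases List.mem_cons.mp hx with rfl | hx'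
      · have hb : x ≤ b := (List.pairwise_cons.mp hpw).1 b (by simp)
        omega
      · exact ih (by simp) (List.pairwise_cons.mp hpw).2 x hx'

theorem maxD_rev_eq (p : List Int) (hs : p.Pairwise (· ≤ ·)) :
    PySem.List.maxD p.reverse (fun x => x) 0 = (p.getLast?).getD 0 := by
  match p with
  | [] => rfl
  | a :: p' =>
    have hne : (a :: p') ≠ [] := by simp
    have hner : (a :: p').reverse ≠ [] := by simp
    have hmem : PySem.List.maxD (a :: p').reverse (fun x => x) 0 ∈ (a :: p') :=
      List.mem_reverse.mp (PySem.List.maxD_mem (a :: p').reverse (fun x => x) 0 hner)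
    have hmax : ∀ y ∈ (a :: p'), y ≤ PySem.List.maxD (a :: p').reverse (fun x => x) 0 := by
      intro y hy
      exact PySem.List.max?_isMax (PySem.List.max?_eq_some_maxD (a :: p').reverse (fun x => x) 0 hner) y
        (List.mem_reverse.mpr hy)
    have hlast : (a :: p').getLast hne ∈ (a :: p') := List.getLast_mem hne
    rw [List.getLast?_eq_some_getLast hne]
    exact le_antisymm (le_getLast_of_pairwise _ hne hs _ hmem) (hmax _ hlast)


theorem insertBy_cons_unfold {α : Type} (before : α → α → Bool) (x y : α) (ys : List α) :
    PySem.List.insertBy before x (y :: ys) =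
      if before x y then x :: y :: ys else y :: PySem.List.insertBy before x ys := rfl

theorem insertBy_pairwise_key {α κ : Type} [LinearOrder κ] (k1 : α → κ)
    (before : α → α → Bool)
    (hT : ∀ a b, before a b = true → k1 a ≤ k1 b)
    (hF : ∀ a b, before a b = false → k1 b ≤ k1 a) :
    ∀ (x : α) (ys : List α), ys.Pairwise (fun a b => k1 a ≤ k1 b) →
      (PySem.List.insertBy before x ys).Pairwise (fun a b => k1 a ≤ k1 b) := by
  intro x ys
  induction ys with
  | nil => intro _; simp [PySem.List.insertBy]
  | cons y ys ih =>
    intro hpw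
    obtain ⟨hy, hpw'⟩ := List.pairwise_cons.mp hpw
    rw [insertBy_cons_unfold]
    by_cases hb : before x y
    · simp only [if_pos hb]
      refine List.pairwise_cons.mpr ⟨?_, hpw⟩
      intro z hz
      have hxy := hT _ _ hb
      rcases List.mem_cons.mp hz with rfl | hz'
      · exact hxy
      · exact le_trans hxy (hy z hz')
    · simp only [if_neg hb]
      refine List.pairwise_cons.mpr ⟨?_, ih hpw'⟩
      have hFx : k1 y ≤ k1 x := hF _ _ (by revert hb; cases before x y <;> simp)
      intro z hz
      rcases (PySem.List.mem_insertBy before x z ys).mp hz with rfl | hz'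
      · exact hFx
      · exact hy z hz'

theorem sorted2_pairwise_fst {α κ1 κ2 : Type} [LinearOrder κ1] [LT κ2] [DecidableLT κ2]
    (xs : List α) (k1 : α → κ1) (k2 : α → κ2) :
    (PySem.List.sorted2 xs k1 k2).Pairwise (fun a b => k1 a ≤ k1 b) := by
  unfold PySem.List.sorted2
  simp only [if_neg (by simp : ¬(false = true))]
  generalize hacc : ([] : List α) = acc
  have hpw : acc.Pairwise (fun a b => k1 a ≤ k1 b) := by rw [← hacc]; simp
  clear hacc
  induction xs generalizing acc with
  | nil => simpa using hpw
  | cons x xs ih =>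
    simp only [List.foldl_cons]
    apply ih
    apply insertBy_pairwise_key k1 _ ?_ ?_ _ _ hpw
    · intro a b hab
      simp only [Bool.or_eq_true, Bool.and_eq_true, decide_eq_true_eq, Bool.not_eq_true'] at hab
      rcases hab with h | ⟨h, _⟩
      · exact le_of_lt h
      · simpa using h
    · intro a b hab
      simp only [Bool.or_eq_false_iff, Bool.and_eq_false_iff, decide_eq_false_iff_not] at hab
      exact le_of_not_gt hab.1


def exVal (w : Int) (p : List Int) : Int := (p.map binom2A).sum - binom2A w

theorem exVal_nonneg (w : Int) (p : List Int) (hw : 0 ≤ w)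
    (hp1 : ∀ x ∈ p, 1 ≤ x) (hkept : w ≤ (p.getLast?).getD 0) : 0 ≤ exVal w p := by
  unfold exVal
  match p with
  | [] =>
    simp at hkept
    have hw0 : w = 0 := le_antisymm hkept hw
    subst hw0
    simp [show binom2A 0 = 0 from by decide]
  | a :: p' =>
    have hne : (a :: p') ≠ [] := by simp
    rw [List.getLast?_eq_some_getLast hne] at hkept
    simp only [Option.getD_some] at hkept
    have hmem : binom2A ((a :: p').getLast hne) ∈ (a :: p').map binom2A :=
      List.mem_map_of_mem (List.getLast_mem hne)
    have hterms : ∀ y ∈ (a :: p').map binom2A, 0 ≤ y := by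
      intro y hy
      obtain ⟨x, hx, rfl⟩ := List.mem_map.mp hy
      exact binom2A_nonneg x (by have := hp1 x hx; omega)
    have h1 : binom2A ((a :: p').getLast hne) ≤ ((a :: p').map binom2A).sum :=
      List.single_le_sum hterms _ hmem
    have h2 : binom2A w ≤ binom2A ((a :: p').getLast hne) := binom2A_mono hw hkept
    omega

theorem rows_foldl_eq (w : Int) (P : List (List Int))
    (hP : ∀ p ∈ P, p.Pairwise (· ≤ ·)) :
    P.foldl (fun rows p =>
        if PySem.List.maxD p.reverse (fun x => x) 0 < w then rows
        else rows ++ [((p.reverse.map binom2A).sum - binom2A w, p.reverse)]) []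
      = (P.filter (fun p => decide (w ≤ (p.getLast?).getD 0))).map
          (fun p => (exVal w p, p.reverse)) := by
  have h1 := PySem.List.foldl_congr_mem' P
    (fun rows p =>
      if PySem.List.maxD p.reverse (fun x => x) 0 < w then rows
      else rows ++ [((p.reverse.map binom2A).sum - binom2A w, p.reverse)])
    (fun rows p =>
      if w ≤ (p.getLast?).getD 0 then rows ++ [(exVal w p, p.reverse)] else rows)
    []
    (by
      intro p hp rows
      simp only
      rw [maxD_rev_eq p (hP p hp)]
      have hsum : (p.reverse.map binom2A).sum = (p.map binom2A).sum := by
        simp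
      by_cases hc : (p.getLast?).getD 0 < w
      · rw [if_pos hc, if_neg (by omega)]
      · rw [if_neg hc, if_pos (by omega), hsum]
        rfl)
  rw [h1]
  simpa using PySem.List.foldl_append_ite
    (p := fun p => w ≤ (p.getLast?).getD 0)
    (f := fun p => (exVal w p, p.reverse)) P []

theorem excB_foldl_eq (w slack : Int) (P : List (List Int)) :
    P.foldl (fun acc parts =>
        if w ≤ (parts.getLast?).getD 0 then
          if (parts.map (fun p => PySem.Int.floordiv (p * (p - 1)) 2)).sum
              - PySem.Int.floordiv (w * (w - 1)) 2 ≤ slack then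
            acc ++ [(parts.map (fun p => PySem.Int.floordiv (p * (p - 1)) 2)).sum
              - PySem.Int.floordiv (w * (w - 1)) 2]
          else acc
        else acc) []
      = ((P.filter (fun p => decide (w ≤ (p.getLast?).getD 0))).map (exVal w)).filter
          (fun e => decide (e ≤ slack)) := by
  have h1 := PySem.List.foldl_congr_mem' P
    (fun acc parts =>
      if w ≤ (parts.getLast?).getD 0 then
        if (parts.map (fun p => PySem.Int.floordiv (p * (p - 1)) 2)).sum
            - PySem.Int.floordiv (w * (w - 1)) 2 ≤ slack then
          acc ++ [(parts.map (fun p => PySem.Int.floordiv (p * (p - 1)) 2)).sum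
            - PySem.Int.floordiv (w * (w - 1)) 2]
        else acc
      else acc)
    (fun acc p =>
      if (w ≤ (p.getLast?).getD 0 ∧ exVal w p ≤ slack) then acc ++ [exVal w p] else acc)
    []
    (by
      intro p hp acc
      simp only
      have he : (p.map (fun q => PySem.Int.floordiv (q * (q - 1)) 2)).sum
          - PySem.Int.floordiv (w * (w - 1)) 2 = exVal w p := rfl
      rw [he]
      split_ifs with h1 h2 h3 h3 <;> first | rfl | (exfalso; tauto))
  rw [h1]
  rw [PySem.List.foldl_append_ite
    (p := fun p => w ≤ (p.getLast?).getD 0 ∧ exVal w p ≤ slack) (f := exVal w) P []]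
  rw [List.filter_map, List.filter_filter]
  simp only [List.nil_append, Function.comp_def]
  apply congrArg
  apply List.filter_congr
  intro p hp
  simp [Bool.and_comm]


def rowF (ss : Nat) (vs : List Int) (k : Nat) : List Int :=
  (List.range (ss + 1)).map (fun s : Nat => Cfun vs k (s : Int))

def tbF (ss nn : Nat) (vs : List Int) : List (List Int) :=
  (List.range (nn + 1)).map (fun k => rowF ss vs k)

theorem rowF_zero (ss : Nat) (vs vs' : List Int) : rowF ss vs 0 = rowF ss vs' 0 := by
  unfold rowF
  apply List.map_congr_left
  intro s _
  rw [Cfun_zero, Cfun_zero]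

theorem rowF_step (ss : Nat) (v : Int) (vs : List Int)
    (hnn : ∀ x ∈ vs ++ [v], 0 ≤ x) (k : Nat) :
    (List.range (ss + 1)).map (fun s =>
        (rowF ss vs (k + 1)).getD s 0 +
          (if v ≤ (s : Int) then (rowF ss (vs ++ [v]) k).getD ((s : Int) - v).toNat 0 else 0))
      = rowF ss (vs ++ [v]) (k + 1) := by
  unfold rowF
  apply List.map_congr_left
  intro s hs
  have hslt : s < ss + 1 := List.mem_range.mp hs
  have hv : 0 ≤ v := hnn v (by simp)
  rw [PySem.List.getD_map_range _ _ _ _ hslt]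
  by_cases hvs : v ≤ (s : Int)
  · rw [if_pos hvs]
    have htn : (((s : Int) - v).toNat) < ss + 1 := by omega
    rw [PySem.List.getD_map_range _ _ _ _ htn]
    have hcast : ((((s : Int) - v).toNat : Nat) : Int) = (s : Int) - v := by omega
    rw [hcast, Cfun_append]
  · rw [if_neg hvs]
    have hneg : Cfun (vs ++ [v]) k ((s : Int) - v) = 0 :=
      Cfun_nonneg_arg_neg _ _ _ hnn (by omega)
    rw [Cfun_append, hneg]

theorem dpRowsB_spec (ss : Nat) (v : Int) (vs : List Int)
    (hnn : ∀ x ∈ vs ++ [v], 0 ≤ x) :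
    ∀ (m k : Nat),
      dpRowsB ss v (rowF ss (vs ++ [v]) k)
          ((List.range m).map (fun i => rowF ss vs (k + 1 + i)))
        = (List.range m).map (fun i => rowF ss (vs ++ [v]) (k + 1 + i)) := by
  intro m
  induction m with
  | zero => intro k; simp [dpRowsB]
  | succ m ih =>
    intro k
    rw [List.range_succ_eq_map]
    simp only [List.map_cons, List.map_map]
    rw [dpRowsB]
    simp only [Nat.add_zero]
    have hrow : (List.range (ss + 1)).map (fun s =>
        (rowF ss vs (k + 1)).getD s 0 +
          (if v ≤ (s : Int) then (rowF ss (vs ++ [v]) k).getD ((s : Int) - v).toNat 0 else 0))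
        = rowF ss (vs ++ [v]) (k + 1) := rowF_step ss v vs hnn k
    rw [hrow]
    congr 1
    have h1 : ((fun i => rowF ss vs (k + 1 + i)) ∘ Nat.succ)
        = fun i => rowF ss vs ((k + 1) + 1 + i) := by
      funext i
      simp only [Function.comp_apply]
      congr 1
      omega
    have h2 : ((fun i => rowF ss (vs ++ [v]) (k + 1 + i)) ∘ Nat.succ)
        = fun i => rowF ss (vs ++ [v]) ((k + 1) + 1 + i) := by
      funext i
      simp only [Function.comp_apply]
      congr 1
      omega
    rw [h1, h2, ih (k + 1)]

theorem dpStep_spec (ss nn : Nat) (v : Int) (vs : List Int)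
    (hnn : ∀ x ∈ vs ++ [v], 0 ≤ x) :
    dpStepB ss v (tbF ss nn vs) = tbF ss nn (vs ++ [v]) := by
  unfold tbF
  rw [List.range_succ_eq_map, List.map_cons, List.map_cons, List.map_map, List.map_map]
  rw [dpStepB]
  congr 1
  · exact rowF_zero ss vs (vs ++ [v])
  · have h1 : ((fun k => rowF ss vs k) ∘ Nat.succ) = fun i => rowF ss vs (0 + 1 + i) := by
      funext i; simp only [Function.comp_apply]; congr 1; omega
    have h2 : ((fun k => rowF ss (vs ++ [v]) k) ∘ Nat.succ)
        = fun i => rowF ss (vs ++ [v]) (0 + 1 + i) := by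
      funext i; simp only [Function.comp_apply]; congr 1; omega
    rw [h1, h2]
    rw [show rowF ss vs 0 = rowF ss (vs ++ [v]) 0 from rowF_zero ss vs (vs ++ [v])]
    exact dpRowsB_spec ss v vs hnn _ 0

theorem dp0_spec (ss nn : Nat) :
    ((1 : Int) :: List.replicate ss 0) :: List.replicate nn (List.replicate (ss + 1) 0)
      = tbF ss nn [] := by
  unfold tbF
  rw [List.range_succ_eq_map, List.map_cons, List.map_map]
  congr 1
  · unfold rowF
    rw [List.range_succ_eq_map, List.map_cons, List.map_map]
    congr 1
    · simp [Cfun_zero]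
    · symm
      rw [List.eq_replicate_iff]
      refine ⟨by simp, ?_⟩
      intro b hb
      simp only [List.mem_map, Function.comp_apply, List.mem_range] at hb
      obtain ⟨a, _, rfl⟩ := hb
      rw [Cfun_zero]
      simp
      omega
  · symm
    rw [List.eq_replicate_iff]
    refine ⟨by simp, ?_⟩
    intro row hrow
    simp only [List.mem_map, Function.comp_apply, List.mem_range] at hrow
    obtain ⟨a, _, rfl⟩ := hrow
    show rowF ss [] a.succ = _
    unfold rowF
    rw [List.eq_replicate_iff]
    refine ⟨by simp, ?_⟩
    intro b hb
    simp only [List.mem_map, List.mem_range] at hb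
    obtain ⟨c, _, rfl⟩ := hb
    exact Cfun_nil_succ a (c : Int)

theorem foldl_dp (ss nn : Nat) :
    ∀ (rest pre : List Int), (∀ x ∈ pre ++ rest, 0 ≤ x) →
      rest.foldl (fun dp v => dpStepB ss v dp) (tbF ss nn pre) = tbF ss nn (pre ++ rest) := by
  intro rest
  induction rest with
  | nil => intro pre _; simp
  | cons v rest ih =>
    intro pre hnn
    rw [List.foldl_cons]
    rw [dpStep_spec ss nn v pre (by
      intro x hx
      apply hnn
      simp at hx ⊢
      tauto)]
    have := ih (pre ++ [v]) (by
      intro x hx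
      apply hnn
      simp at hx ⊢
      tauto)
    rw [this]
    simp

-- ===== VERDICT (by name: the statement is the Claim_ definition above) =====
-- A's values list equals B's values list
theorem values_eq (n w slack : Int) :
    ((PySem.List.sorted2
        ((partsA ((n - 1).toNat + 1) (n - 1) 1).foldl
          (fun rows p =>
            if PySem.List.maxD p.reverse (fun x => x) 0 < w then rows
            else rows ++ [((p.reverse.map binom2A).sum - binom2A w, p.reverse)]) [])
        (fun row => row.1) (fun row => row.2)).filter
      (fun row => decide (row.1 ≤ slack))).map (fun row => row.1)
    = PySem.List.sorted
        (((((partsA ((n - 1).toNat + 1) (n - 1) 1).filter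
            (fun p => decide (w ≤ (p.getLast?).getD 0))).map (exVal w)).filter
          (fun e => decide (e ≤ slack)))) (fun x => x) := by
  set P := partsA ((n - 1).toNat + 1) (n - 1) 1 with hP
  have hprops := partsA_props ((n - 1).toNat + 1) (n - 1) 1 (by omega)
  have hrows := rows_foldl_eq w P (fun p hp => (hprops p hp).2)
  rw [hrows]
  set E := (((P.filter (fun p => decide (w ≤ (p.getLast?).getD 0))).map (exVal w)).filter
    (fun e => decide (e ≤ slack))) with hE
  -- the filtered-sorted A list is a permutation of E
  have hpermraw : (PySem.List.sorted2
      ((P.filter (fun p => decide (w ≤ (p.getLast?).getD 0))).map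
        (fun p => (exVal w p, p.reverse)))
      (fun row => row.1) (fun row => row.2)).Perm
      ((P.filter (fun p => decide (w ≤ (p.getLast?).getD 0))).map
        (fun p => (exVal w p, p.reverse))) := PySem.List.sorted2_perm _ _ _ _
  have hpermA : (((PySem.List.sorted2
      ((P.filter (fun p => decide (w ≤ (p.getLast?).getD 0))).map
        (fun p => (exVal w p, p.reverse)))
      (fun row => row.1) (fun row => row.2)).filter
      (fun row => decide (row.1 ≤ slack))).map (fun row => row.1)).Perm E := by
    have h1 := (hpermraw.filter (fun row => decide (row.1 ≤ slack))).map (fun row => row.1)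
    apply h1.trans
    rw [hE, List.filter_map, List.filter_map, List.map_map]
    rfl
  have hpwA : (((PySem.List.sorted2
      ((P.filter (fun p => decide (w ≤ (p.getLast?).getD 0))).map
        (fun p => (exVal w p, p.reverse)))
      (fun row => row.1) (fun row => row.2)).filter
      (fun row => decide (row.1 ≤ slack))).map (fun row => row.1)).Pairwise (· ≤ ·) := by
    rw [List.pairwise_map]
    exact (sorted2_pairwise_fst _ _ _).filter _
  have hpwB : (PySem.List.sorted E (fun x => x)).Pairwise (· ≤ ·) := by
    have := PySem.List.sorted_pairwise E (fun x => x)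
    simpa using this
  have hpermB : E.Perm (PySem.List.sorted E (fun x => x)) :=
    (PySem.List.sorted_perm E (fun x => x) false).symm
  exact PySem.List.eq_of_perm_of_pairwise_le (hpermA.trans hpermB) hpwA hpwB

theorem capacity_deficit_distribution_spec : Claim_equal_capacity_deficit_distribution := by
  intro n w _hdom hpre
  obtain ⟨hn, hw⟩ := hpre
  unfold Spec_capacity_deficit_distribution
  have hslack_eq : n * (n - 2) - PySem.Int.floordiv (w * (w - 1)) 2 * n
      = base_apex_slackA n w := rfl
  by_cases hsl : base_apex_slackA n w < 0
  · simp only [capacity_deficit_distribution, capacity_deficit_distribution_alt]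
    rw [hslack_eq, if_pos hsl, PySem.List.pyRange_one_eq_nil (by omega)]
    simp
  · replace hsl : 0 ≤ base_apex_slackA n w := by omega
    obtain ⟨sl, hsleq⟩ :
        ∃ sl, n * (n - 2) - PySem.Int.floordiv (w * (w - 1)) 2 * n = sl := ⟨_, rfl⟩
    have hb' : n * (n - 2) - binom2A w * n = sl := hsleq
    have hbase : base_apex_slackA n w = sl := hb'
    have hsl0 : 0 ≤ sl := by rw [← hbase]; exact hsl
    set P := partsA ((n - 1).toNat + 1) (n - 1) 1 with hPdef
    have hprops := partsA_props ((n - 1).toNat + 1) (n - 1) 1 (by omega)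
    simp only [capacity_deficit_distribution, capacity_deficit_distribution_alt,
      excess_distributionsA, distance_profilesA, base_apex_slackA, hsleq, hb']
    rw [if_neg (by omega)]
    rw [partsB_eq_partsA ((n - 1).toNat + 1) (n - 1) 1, ← hPdef,
      excB_foldl_eq w sl P, dp0_spec sl.toNat n.toNat]
    rw [values_eq n w sl]
    set E := (((P.filter (fun p => decide (w ≤ (p.getLast?).getD 0))).map (exVal w)).filter
      (fun e => decide (e ≤ sl))) with hEdef
    set V := PySem.List.sorted E (fun x => x) with hVdef
    have hnnE : ∀ x ∈ E, 0 ≤ x := by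
      intro x hx
      rw [hEdef] at hx
      have hx1 := List.mem_of_mem_filter hx
      obtain ⟨p, hp, rfl⟩ := List.mem_map.mp hx1
      have hp1 := List.mem_of_mem_filter hp
      have hpc := List.of_mem_filter hp
      simp only [decide_eq_true_eq] at hpc
      exact exVal_nonneg w p hw (fun y hy => (hprops p hp1).1 y hy) hpc
    have hnnV : ∀ x ∈ V, 0 ≤ x := by
      intro x hx
      exact hnnE x ((PySem.List.mem_sorted E (fun y => y) false x).mp hx)
    have hpwV : V.Pairwise (· ≤ ·) := by
      have := PySem.List.sorted_pairwise E (fun x => x)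
      simpa using this
    rw [foldl_dp sl.toNat n.toNat V [] (by simpa using hnnV), List.nil_append]
    apply List.map_congr_left
    intro d hd
    obtain ⟨hd0, hd1⟩ := (PySem.List.mem_pyRange_one).mp hd
    simp only [List.cons.injEq, Prod.mk.injEq, and_true, true_and]
    -- A's counter entry = B's dp entry
    rw [PySem.Dict.getD_counter]
    rw [List.count_eq_countP, List.countP_map,
      ((PySem.List.sorted2_perm (searchA V sl 0 n.toNat sl [])
        (fun row => row.2.1) (fun row => row.1) false).countP_eq _)]
    rw [List.countP_congr (fun r hr => by
      have hrd := searchA_deficit V sl 0 n.toNat sl [] r hr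
      show (((fun x => x == d) ∘ fun r : List Int × Int × Int => r.2.2) r = true)
          ↔ ((fun x : List Int × Int × Int => x.2.1 == sl - d) r = true)
      simp only [Function.comp_apply, beq_iff_eq]
      omega)]
    have hc := searchA_count V sl hpwV hnnV 0 n.toNat sl [] (sl - d) (by omega)
    simp only [List.sum_nil, zero_add, List.drop_zero] at hc
    rw [hc]
    unfold tbF
    rw [PySem.List.getD_map_range _ _ _ _ (by omega : n.toNat < n.toNat + 1)]
    unfold rowF
    rw [PySem.List.getD_map_range _ _ _ _ (by omega : (sl - d).toNat < sl.toNat + 1)]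
    rw [show (((sl - d).toNat : Nat) : Int) = sl - d by omega]
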